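-- pv_equiv track=rewrite | github.com/Lee-sh98/Coding-Study | 백준/Bronze/16205. 변수명/변수명.py | pascal_split
-- ===== SOURCE A (Python) =====
-- def pascal_split(word):
--     result = []
--     tmp = ""
--     for w in word:
--         if w.isupper() and tmp:
--             result.append(tmp.lower())
--             tmp = ""
--         tmp += w
--
--     if tmp:
--         result.append(tmp.lower())
--     return result
-- ===== SOURCE B (Python) =====
-- def pascal_split(word):
--     segments = []
--     i = 0
--     n = len(word)
--     while i < n:
--         j = i + 1
--         while j < n and not word[j].isupper():
--             j += 1
--         segments.append(word[i:j].lower())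
--         i = j
--     return segments
-- ===== Notes on version B (the rewrite author's own statement) =====
-- stated objective: alternative
-- what changed: B replaces A's running character buffer with an index-based outer/inner scan: the inner loop finds the next uppercase boundary and B appends the lowered slice word[i:j], instead of accumulating characters into tmp and flushing it.
import Mathlib
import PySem

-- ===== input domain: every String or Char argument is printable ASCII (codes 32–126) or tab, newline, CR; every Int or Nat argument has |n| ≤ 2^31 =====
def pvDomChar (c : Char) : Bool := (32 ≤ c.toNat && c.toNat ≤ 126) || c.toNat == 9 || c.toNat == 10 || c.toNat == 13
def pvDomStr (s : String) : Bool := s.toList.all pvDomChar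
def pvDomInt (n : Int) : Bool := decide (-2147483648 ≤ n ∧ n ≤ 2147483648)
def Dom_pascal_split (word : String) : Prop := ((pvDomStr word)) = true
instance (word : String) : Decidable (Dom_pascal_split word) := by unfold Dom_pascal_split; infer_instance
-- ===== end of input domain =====

-- B scans for the next uppercase boundary and slices, instead of A's running buffer; same values, alternative decomposition.
-- ===== PORT A =====
-- A's loop: state (result, tmp); each char either flushes tmp.lower() and restarts tmp, or is appended to tmp.
def pascalA_loop : List Char → List String → List Char → List String
  | [], res, tmp => if tmp.isEmpty then res else res ++ [String.mk (PySem.Chars.lower tmp)]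
  | c :: rest, res, tmp =>
      if PySem.Chars.isupper c && !tmp.isEmpty then
        pascalA_loop rest (res ++ [String.mk (PySem.Chars.lower tmp)]) [c]
      else
        pascalA_loop rest res (tmp ++ [c])

def pascal_split (word : String) : List String :=
  pascalA_loop word.toList [] []

-- ===== PORT B =====
-- inner while loop of Source B: advance j past non-uppercase chars; returns (chars passed, remaining suffix)
def pascalB_scan : List Char → List Char × List Char
  | [] => ([], [])
  | c :: rest =>
      if PySem.Chars.isupper c then ([], c :: rest)
      else (c :: (pascalB_scan rest).1, (pascalB_scan rest).2)

theorem pascalB_scan_len (l : List Char) : (pascalB_scan l).2.length ≤ l.length := by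
  induction l with
  | nil => simp [pascalB_scan]
  | cons c rest ih =>
      simp only [pascalB_scan]
      split <;> simp <;> omega

-- outer while loop of Source B: each step emits word[i:j].lower() and continues at j
def pascalB_go : List Char → List String
  | [] => []
  | c :: rest =>
      String.mk (PySem.Chars.lower (c :: (pascalB_scan rest).1)) :: pascalB_go (pascalB_scan rest).2
termination_by l => l.length
decreasing_by
  simpa using Nat.lt_succ_of_le (pascalB_scan_len rest)

def pascal_split_alt (word : String) : List String :=
  pascalB_go word.toList

-- ===== PRECONDITION & SPEC =====
def Spec_pascal_split (word : String) (out : List String) : Prop := out = pascal_split_alt word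
instance (word : String) (out : List String) : Decidable (Spec_pascal_split word out) := by unfold Spec_pascal_split; infer_instance

-- ===== CLAIM (what is proved, stated in full; the proofs are below) =====
def Claim_equal_pascal_split : Prop := ∀ (word : String), Dom_pascal_split word → Spec_pascal_split word (pascal_split word)

-- ===== LEMMAS AND PROOFS =====

-- ===== VERDICT (by name: the statement is the Claim_ definition above) =====
theorem pascalA_loop_eq (cs : List Char) : ∀ (res : List String) (tmp : List Char), tmp ≠ [] →
    pascalA_loop cs res tmp =
      res ++ String.mk (PySem.Chars.lower (tmp ++ (pascalB_scan cs).1)) :: pascalB_go (pascalB_scan cs).2 := by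
  induction cs with
  | nil =>
      intro res tmp h
      simp [pascalA_loop, pascalB_scan, pascalB_go, List.isEmpty_iff, h]
  | cons c rest ih =>
      intro res tmp h
      by_cases hc : PySem.Chars.isupper c = true
      · have : pascalA_loop (c :: rest) res tmp
            = pascalA_loop rest (res ++ [String.mk (PySem.Chars.lower tmp)]) [c] := by
          simp [pascalA_loop, hc, List.isEmpty_iff, h]
        rw [this, ih _ [c] (by simp)]
        simp [pascalB_scan, hc, pascalB_go]
      · have : pascalA_loop (c :: rest) res tmp = pascalA_loop rest res (tmp ++ [c]) := by
          simp [pascalA_loop, hc]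
        rw [this, ih _ (tmp ++ [c]) (by simp)]
        simp [pascalB_scan, hc]

theorem pascal_split_spec : Claim_equal_pascal_split := by
  intro word _
  unfold Spec_pascal_split pascal_split pascal_split_alt
  cases h : word.toList with
  | nil => simp [pascalA_loop, pascalB_go]
  | cons c cs =>
      have step : pascalA_loop (c :: cs) [] [] = pascalA_loop cs [] [c] := by
        simp [pascalA_loop]
      rw [step, pascalA_loop_eq cs [] [c] (by simp)]
      simp [pascalB_go]
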